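-- pv_equiv track=rewrite | github.com/AlexPazzaglia/ZebrafishSNN | network_modules/equations/utils.py | cpg_seg_pools_indices
-- ===== SOURCE A (Python) =====
-- def cpg_seg_pools_indices(  segments: int,
--                         n_e_semi: int,
--                         n_i_semi: int
--                     ) -> tuple[list[list[int]], list[list[int]], list[list[int]], list[list[int]]]:
--     '''
--     Indeces of axial neuron pool (ex_l, ex_r, in_l, in_r).\n
--     Each output is a list containing the lists of indices for the corresponding pool and segments.\n
--     Ex: ex_l[i][j] represents the j-th neuron of the i-th segment in the left excitatory pool
--     '''
--
--     n_ex = 2*n_e_semi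
--     n_seg = n_ex + 2*n_i_semi
--
--     ex_l = [
--         [x + y * n_seg for x in range(n_e_semi)]
--         for y in range(segments)
--     ]
--     ex_r = [
--         [x + y * n_seg + n_e_semi for x in range(n_e_semi)]
--         for y in range(segments)
--     ]
--     in_l = [
--         [x + y * n_seg + n_ex for x in range(n_i_semi)]
--         for y in range(segments)
--     ]
--     in_r = [
--         [x + y * n_seg + n_ex + n_i_semi for x in range(n_i_semi)]
--         for y in range(segments)
--     ]
--
--     return ex_l, ex_r, in_l, in_r
-- ===== SOURCE B (Python) =====
-- def cpg_seg_pools_indices(  segments: int,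
--                         n_e_semi: int,
--                         n_i_semi: int
--                     ) -> tuple[list[list[int]], list[list[int]], list[list[int]], list[list[int]]]:
--     '''
--     Indices of axial neuron pools (ex_l, ex_r, in_l, in_r), built in a single
--     pass: a running offset walks segment by segment and each pool's indices
--     are emitted as one contiguous range instead of per-element arithmetic.
--     '''
--     ex_l, ex_r, in_l, in_r = [], [], [], []
--     off = 0
--     for _ in range(segments):
--         ex_l.append(list(range(off, off + n_e_semi)))
--         ex_r.append(list(range(off + n_e_semi, off + 2 * n_e_semi)))
--         in_l.append(list(range(off + 2 * n_e_semi, off + 2 * n_e_semi + n_i_semi)))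
--         in_r.append(list(range(off + 2 * n_e_semi + n_i_semi, off + 2 * n_e_semi + 2 * n_i_semi)))
--         off += 2 * n_e_semi + 2 * n_i_semi
--     return ex_l, ex_r, in_l, in_r
-- ===== Notes on version B (the rewrite author's own statement) =====
-- stated objective: alternative
-- what changed: Four independent per-pool comprehensions with per-element offset arithmetic are replaced by one fused pass over the segments that carries a running offset and emits each pool's indices as a contiguous range.
import Mathlib
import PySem

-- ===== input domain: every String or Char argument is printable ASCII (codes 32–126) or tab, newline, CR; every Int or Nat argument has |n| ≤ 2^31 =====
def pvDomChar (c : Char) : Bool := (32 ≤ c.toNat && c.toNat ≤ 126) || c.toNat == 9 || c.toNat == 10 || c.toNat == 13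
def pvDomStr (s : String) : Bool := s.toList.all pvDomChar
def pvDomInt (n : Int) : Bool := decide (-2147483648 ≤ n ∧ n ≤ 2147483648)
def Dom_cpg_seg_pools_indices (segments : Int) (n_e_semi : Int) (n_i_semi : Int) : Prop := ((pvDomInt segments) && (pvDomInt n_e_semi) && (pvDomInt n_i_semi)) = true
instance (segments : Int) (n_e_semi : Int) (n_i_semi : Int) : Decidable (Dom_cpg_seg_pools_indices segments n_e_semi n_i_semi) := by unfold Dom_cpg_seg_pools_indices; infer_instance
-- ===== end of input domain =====

-- B builds the four pools in one fused pass with a running offset, emitting each pool as a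
-- contiguous range, instead of A's four independent comprehensions (objective: alternative).


-- ===== PORT A =====
def cpg_seg_pools_indices (segments : Int) (n_e_semi : Int) (n_i_semi : Int) : List (List Int) × List (List Int) × List (List Int) × List (List Int) :=
  let n_ex := 2 * n_e_semi
  let n_seg := n_ex + 2 * n_i_semi
  let ex_l := (PySem.List.pyRange 0 segments 1).map (fun y =>
    (PySem.List.pyRange 0 n_e_semi 1).map (fun x => x + y * n_seg))
  let ex_r := (PySem.List.pyRange 0 segments 1).map (fun y =>
    (PySem.List.pyRange 0 n_e_semi 1).map (fun x => x + y * n_seg + n_e_semi))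
  let in_l := (PySem.List.pyRange 0 segments 1).map (fun y =>
    (PySem.List.pyRange 0 n_i_semi 1).map (fun x => x + y * n_seg + n_ex))
  let in_r := (PySem.List.pyRange 0 segments 1).map (fun y =>
    (PySem.List.pyRange 0 n_i_semi 1).map (fun x => x + y * n_seg + n_ex + n_i_semi))
  (ex_l, ex_r, in_l, in_r)

-- ===== PORT B =====
-- loop body of B: append the four contiguous ranges for the current segment, advance the offset
def cpgAltStep (n_e_semi : Int) (n_i_semi : Int)
    (acc : List (List Int) × List (List Int) × List (List Int) × List (List Int) × Int)
    (_y : Int) : List (List Int) × List (List Int) × List (List Int) × List (List Int) × Int :=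
  let off := acc.2.2.2.2
  (acc.1 ++ [PySem.List.pyRange off (off + n_e_semi) 1],
   acc.2.1 ++ [PySem.List.pyRange (off + n_e_semi) (off + 2 * n_e_semi) 1],
   acc.2.2.1 ++ [PySem.List.pyRange (off + 2 * n_e_semi) (off + 2 * n_e_semi + n_i_semi) 1],
   acc.2.2.2.1 ++ [PySem.List.pyRange (off + 2 * n_e_semi + n_i_semi) (off + 2 * n_e_semi + 2 * n_i_semi) 1],
   off + 2 * n_e_semi + 2 * n_i_semi)

def cpg_seg_pools_indices_alt (segments : Int) (n_e_semi : Int) (n_i_semi : Int) : List (List Int) × List (List Int) × List (List Int) × List (List Int) :=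
  let r := (PySem.List.pyRange 0 segments 1).foldl (cpgAltStep n_e_semi n_i_semi)
    ([], [], [], [], 0)
  (r.1, r.2.1, r.2.2.1, r.2.2.2.1)

-- ===== PRECONDITION & SPEC =====
def Spec_cpg_seg_pools_indices (segments : Int) (n_e_semi : Int) (n_i_semi : Int) (out : List (List Int) × List (List Int) × List (List Int) × List (List Int)) : Prop := out = cpg_seg_pools_indices_alt segments n_e_semi n_i_semi
instance (segments : Int) (n_e_semi : Int) (n_i_semi : Int) (out : List (List Int) × List (List Int) × List (List Int) × List (List Int)) : Decidable (Spec_cpg_seg_pools_indices segments n_e_semi n_i_semi out) := by unfold Spec_cpg_seg_pools_indices; infer_instance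

-- ===== CLAIM (what is proved, stated in full; the proofs are below) =====
def Claim_equal_cpg_seg_pools_indices : Prop := ∀ (segments : Int) (n_e_semi : Int) (n_i_semi : Int), Dom_cpg_seg_pools_indices segments n_e_semi n_i_semi → Spec_cpg_seg_pools_indices segments n_e_semi n_i_semi (cpg_seg_pools_indices segments n_e_semi n_i_semi)

-- ===== LEMMAS AND PROOFS =====

-- a contiguous range is the shifted 0-based range
lemma pyRange_shift (c n : Int) :
    PySem.List.pyRange c (c + n) 1 = (PySem.List.pyRange 0 n 1).map (fun x => x + c) := by
  rw [PySem.List.pyRange_one, PySem.List.pyRange_one, List.map_map]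
  simp only [add_sub_cancel_left, Int.sub_zero]
  exact List.map_congr_left (fun k _ => by simp [Function.comp]; ring)

-- invariant of B's fold: after s segments the accumulator holds A's first s rows and offset s*n_seg
lemma cpgAlt_inv (n_e_semi n_i_semi : Int) (s : Nat) :
    (PySem.List.pyRange 0 (s : Int) 1).foldl (cpgAltStep n_e_semi n_i_semi) ([], [], [], [], 0) =
      ((PySem.List.pyRange 0 (s : Int) 1).map (fun y =>
        (PySem.List.pyRange 0 n_e_semi 1).map (fun x => x + y * (2 * n_e_semi + 2 * n_i_semi))),
       (PySem.List.pyRange 0 (s : Int) 1).map (fun y =>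
        (PySem.List.pyRange 0 n_e_semi 1).map (fun x => x + y * (2 * n_e_semi + 2 * n_i_semi) + n_e_semi)),
       (PySem.List.pyRange 0 (s : Int) 1).map (fun y =>
        (PySem.List.pyRange 0 n_i_semi 1).map (fun x => x + y * (2 * n_e_semi + 2 * n_i_semi) + 2 * n_e_semi)),
       (PySem.List.pyRange 0 (s : Int) 1).map (fun y =>
        (PySem.List.pyRange 0 n_i_semi 1).map (fun x => x + y * (2 * n_e_semi + 2 * n_i_semi) + 2 * n_e_semi + n_i_semi)),
       (s : Int) * (2 * n_e_semi + 2 * n_i_semi)) := by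
  induction s with
  | zero => simp [PySem.List.pyRange_one_eq_nil]
  | succ k ih =>
    have h0 : (0 : Int) ≤ (k : Int) := Int.natCast_nonneg k
    have hs : ((k + 1 : Nat) : Int) = (k : Int) + 1 := by push_cast; ring
    rw [hs, PySem.List.pyRange_one_succ_right h0, List.foldl_append, List.foldl_cons,
      List.foldl_nil, ih]
    simp only [cpgAltStep, List.map_append, List.map_cons, List.map_nil]
    refine Prod.ext ?_ (Prod.ext ?_ (Prod.ext ?_ (Prod.ext ?_ ?_)))
    · simp only
      congr 2
      rw [pyRange_shift ((k : Int) * (2 * n_e_semi + 2 * n_i_semi)) n_e_semi]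
    · simp only
      congr 2
      rw [show (k : Int) * (2 * n_e_semi + 2 * n_i_semi) + 2 * n_e_semi =
          ((k : Int) * (2 * n_e_semi + 2 * n_i_semi) + n_e_semi) + n_e_semi by ring,
        pyRange_shift ((k : Int) * (2 * n_e_semi + 2 * n_i_semi) + n_e_semi) n_e_semi]
      exact List.map_congr_left (fun x _ => by ring)
    · simp only
      congr 2
      rw [show (k : Int) * (2 * n_e_semi + 2 * n_i_semi) + 2 * n_e_semi + n_i_semi =
          ((k : Int) * (2 * n_e_semi + 2 * n_i_semi) + 2 * n_e_semi) + n_i_semi by ring,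
        pyRange_shift ((k : Int) * (2 * n_e_semi + 2 * n_i_semi) + 2 * n_e_semi) n_i_semi]
      exact List.map_congr_left (fun x _ => by ring)
    · simp only
      congr 2
      rw [show (k : Int) * (2 * n_e_semi + 2 * n_i_semi) + 2 * n_e_semi + 2 * n_i_semi =
          ((k : Int) * (2 * n_e_semi + 2 * n_i_semi) + 2 * n_e_semi + n_i_semi) + n_i_semi by ring,
        pyRange_shift ((k : Int) * (2 * n_e_semi + 2 * n_i_semi) + 2 * n_e_semi + n_i_semi) n_i_semi]
      exact List.map_congr_left (fun x _ => by ring)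
    · simp only
      ring

-- ===== VERDICT (by name: the statement is the Claim_ definition above) =====
theorem cpg_seg_pools_indices_spec : Claim_equal_cpg_seg_pools_indices := by
  intro segments n_e_semi n_i_semi _
  unfold Spec_cpg_seg_pools_indices cpg_seg_pools_indices cpg_seg_pools_indices_alt
  by_cases hseg : segments ≤ 0
  · rw [PySem.List.pyRange_one_eq_nil hseg]; simp
  · have hs : segments = ((segments.toNat : Nat) : Int) := by omega
    rw [hs, cpgAlt_inv]
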